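-- pv_equiv track=rewrite | github.com/hck717/FYP | agents/stock_research_agent/agent_step5_transcript_features.py | compare_kpi_coverage
-- ===== SOURCE A (Python) =====
-- def compare_kpi_coverage(latest_features: dict, prev_features: dict) -> dict:
--     """
--     Find KPIs mentioned in previous transcript but NOT in latest (dropped KPIs)
--     and vice versa (new KPIs).
--     """
--     latest_mentioned = {kw for kw, cnt in latest_features["kpi_counts"].items() if cnt > 0}
--     prev_mentioned   = {kw for kw, cnt in prev_features["kpi_counts"].items()  if cnt > 0}
--
--     dropped  = sorted(prev_mentioned - latest_mentioned)
--     added    = sorted(latest_mentioned - prev_mentioned)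
--     retained = sorted(latest_mentioned & prev_mentioned)
--
--     return {
--         "dropped_kpis":  dropped,
--         "added_kpis":    added,
--         "retained_kpis": retained,
--     }
-- ===== SOURCE B (Python) =====
-- def compare_kpi_coverage(latest_features: dict, prev_features: dict) -> dict:
--     """
--     Find KPIs mentioned in previous transcript but NOT in latest (dropped KPIs)
--     and vice versa (new KPIs).
--     """
--     latest = sorted({kw for kw, cnt in latest_features["kpi_counts"].items() if cnt > 0})
--     prev   = sorted({kw for kw, cnt in prev_features["kpi_counts"].items()  if cnt > 0})
--
--     # two-pointer merge of the two sorted keyword lists: no set differences,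
--     # no membership tests -- classification falls out of the merge order.
--     dropped, added, retained = [], [], []
--     i = j = 0
--     while i < len(latest) and j < len(prev):
--         if latest[i] == prev[j]:
--             retained.append(latest[i]); i += 1; j += 1
--         elif latest[i] < prev[j]:
--             added.append(latest[i]); i += 1
--         else:
--             dropped.append(prev[j]); j += 1
--     added.extend(latest[i:])
--     dropped.extend(prev[j:])
--
--     return {
--         "dropped_kpis":  dropped,
--         "added_kpis":    added,
--         "retained_kpis": retained,
--     }
-- ===== Notes on version B (the rewrite author's own statement) =====
-- stated objective: alternative
-- what changed: B sorts the latest and prev mentioned-keyword lists separately and classifies by a two-pointer merge of the two sorted lists (equal head = retained, smaller latest head = added, smaller prev head = dropped, leftovers extended), eliminating A's set difference/intersection operations and its three sorted() calls over set operands; Pre_ excludes inputs missing the 'kpi_counts' key, where A raises KeyError (B raises too).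
import Mathlib
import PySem

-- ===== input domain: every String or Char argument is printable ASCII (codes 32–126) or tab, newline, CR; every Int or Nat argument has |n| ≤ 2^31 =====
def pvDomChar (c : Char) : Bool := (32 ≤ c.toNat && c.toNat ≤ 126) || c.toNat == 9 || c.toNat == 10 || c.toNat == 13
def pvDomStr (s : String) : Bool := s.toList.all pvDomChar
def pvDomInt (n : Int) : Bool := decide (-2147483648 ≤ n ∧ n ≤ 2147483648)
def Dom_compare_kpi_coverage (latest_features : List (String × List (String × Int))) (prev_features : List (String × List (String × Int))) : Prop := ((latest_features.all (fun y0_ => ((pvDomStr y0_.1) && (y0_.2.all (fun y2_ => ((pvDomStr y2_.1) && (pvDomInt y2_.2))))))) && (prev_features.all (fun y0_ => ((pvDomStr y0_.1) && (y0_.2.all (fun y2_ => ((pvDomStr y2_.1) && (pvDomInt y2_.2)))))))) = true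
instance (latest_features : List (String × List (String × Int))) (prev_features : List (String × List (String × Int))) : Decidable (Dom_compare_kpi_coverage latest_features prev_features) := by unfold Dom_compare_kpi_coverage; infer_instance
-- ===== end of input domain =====

-- B replaces A's three sorted set differences/intersections by sorting the two mentioned-keyword
-- lists separately and classifying via a two-pointer merge (alternative algorithm, same cost).

-- ===== PORT A =====
-- latest_features["kpi_counts"] is a KeyError when absent: total form getD [] is used ONLY under Pre_.
-- The inner value is a Python dict: .items() iterates its deduplicated (last value wins) pairs = (Dict.mk …).items.
def compare_kpi_coverage (latest_features : List (String × List (String × Int))) (prev_features : List (String × List (String × Int))) : List (String × List String) :=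
  let latest_counts := (PySem.Dict.mk ((PySem.Dict.mk latest_features).getD "kpi_counts" [])).items
  let prev_counts := (PySem.Dict.mk ((PySem.Dict.mk prev_features).getD "kpi_counts" [])).items
  let latest_mentioned : PySem.Set String :=
    PySem.Set.ofList ((latest_counts.filter (fun p => decide (p.2 > 0))).map (·.1))
  let prev_mentioned : PySem.Set String :=
    PySem.Set.ofList ((prev_counts.filter (fun p => decide (p.2 > 0))).map (·.1))
  let dropped := PySem.List.sorted (PySem.Set.diff prev_mentioned latest_mentioned) (fun x => x) false
  let added := PySem.List.sorted (PySem.Set.diff latest_mentioned prev_mentioned) (fun x => x) false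
  let retained := PySem.List.sorted (PySem.Set.inter latest_mentioned prev_mentioned) (fun x => x) false
  [("dropped_kpis", dropped), ("added_kpis", added), ("retained_kpis", retained)]

-- ===== PORT B =====
-- Source B's while loop over two indices, as the obvious recursion on the two sorted lists;
-- the trailing extends are the base cases. Returns (dropped, added, retained).
def mergeKpis : List String → List String → List String × List String × List String
  | [], lp => (lp, [], [])
  | a :: la, [] => ([], a :: la, [])
  | a :: la, b :: lp =>
    if a == b then
      let r := mergeKpis la lp
      (r.1, r.2.1, a :: r.2.2)
    else if a < b then
      let r := mergeKpis la (b :: lp)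
      (r.1, a :: r.2.1, r.2.2)
    else
      let r := mergeKpis (a :: la) lp
      (b :: r.1, r.2.1, r.2.2)
termination_by la lp => la.length + lp.length
decreasing_by all_goals (simp; try omega)

def compare_kpi_coverage_alt (latest_features : List (String × List (String × Int))) (prev_features : List (String × List (String × Int))) : List (String × List String) :=
  let latest_counts := (PySem.Dict.mk ((PySem.Dict.mk latest_features).getD "kpi_counts" [])).items
  let prev_counts := (PySem.Dict.mk ((PySem.Dict.mk prev_features).getD "kpi_counts" [])).items
  let latest := PySem.List.sorted (PySem.Set.ofList ((latest_counts.filter (fun p => decide (p.2 > 0))).map (·.1))) (fun x => x) false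
  let prev := PySem.List.sorted (PySem.Set.ofList ((prev_counts.filter (fun p => decide (p.2 > 0))).map (·.1))) (fun x => x) false
  let r := mergeKpis latest prev
  [("dropped_kpis", r.1), ("added_kpis", r.2.1), ("retained_kpis", r.2.2)]

-- ===== PRECONDITION & SPEC =====
-- Pre_ excludes exactly the inputs where Python A raises KeyError: a missing "kpi_counts" key in either dict.
def Pre_compare_kpi_coverage (latest_features : List (String × List (String × Int))) (prev_features : List (String × List (String × Int))) : Prop :=
  (PySem.Dict.mk latest_features).contains "kpi_counts" = true ∧ (PySem.Dict.mk prev_features).contains "kpi_counts" = true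
instance (latest_features : List (String × List (String × Int))) (prev_features : List (String × List (String × Int))) : Decidable (Pre_compare_kpi_coverage latest_features prev_features) := by unfold Pre_compare_kpi_coverage; infer_instance
def pvWitness_compare_kpi_coverage : (List (String × List (String × Int))) × (List (String × List (String × Int))) :=
  ([("kpi_counts", [("revenue", 2), ("eps", 0)])], [("kpi_counts", [("eps", 1)])])
def Spec_compare_kpi_coverage (latest_features : List (String × List (String × Int))) (prev_features : List (String × List (String × Int))) (out : List (String × List String)) : Prop := out = compare_kpi_coverage_alt latest_features prev_features
instance (latest_features : List (String × List (String × Int))) (prev_features : List (String × List (String × Int))) (out : List (String × List String)) : Decidable (Spec_compare_kpi_coverage latest_features prev_features out) := by unfold Spec_compare_kpi_coverage; infer_instance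

-- ===== CLAIM (what is proved, stated in full; the proofs are below) =====
def Claim_equal_compare_kpi_coverage : Prop := ∀ (latest_features : List (String × List (String × Int))) (prev_features : List (String × List (String × Int))), Dom_compare_kpi_coverage latest_features prev_features → Pre_compare_kpi_coverage latest_features prev_features → Spec_compare_kpi_coverage latest_features prev_features (compare_kpi_coverage latest_features prev_features)

-- ===== LEMMAS AND PROOFS =====

-- Strict sortedness of the sorted form of a nodup list.
theorem pv_sorted_pairwise_lt (l : List String) (hnd : l.Nodup) :
    (PySem.List.sorted l (fun x => x) false).Pairwise (· < ·) := by
  have hle := PySem.List.sorted_pairwise l (fun x => x)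
  have hnd' : (PySem.List.sorted l (fun x => x) false).Nodup :=
    (PySem.List.sorted_perm l (fun x => x) false).nodup_iff.mpr hnd
  exact (hle.and hnd').imp (fun h => lt_of_le_of_ne h.1 h.2)

-- Filtering the sorted list equals sorting the matching sub-set.
theorem pv_filter_sorted (l w : List String) (hl : l.Nodup) (hw : w.Nodup)
    (p : String → Bool) (hmem : ∀ x, x ∈ w ↔ (x ∈ l ∧ p x = true)) :
    (PySem.List.sorted l (fun x => x) false).filter p = PySem.List.sorted w (fun x => x) false := by
  have hperm : ((PySem.List.sorted l (fun x => x) false).filter p).Perm w := by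
    have hnd1 : ((PySem.List.sorted l (fun x => x) false).filter p).Nodup :=
      ((PySem.List.sorted_perm l (fun x => x) false).nodup_iff.mpr hl).filter p
    rw [List.perm_ext_iff_of_nodup hnd1 hw]
    intro x
    simp [List.mem_filter, PySem.List.mem_sorted, hmem]
  exact (PySem.List.sorted_eq_of_perm_of_pairwise_lt w _ (fun x => x) hperm
    ((pv_sorted_pairwise_lt l hl).filter p)).symm

-- The two-pointer merge of two STRICTLY increasing lists is the three classifying filters.
theorem pv_merge_eq (la lp : List String) (ha : la.Pairwise (· < ·)) (hp : lp.Pairwise (· < ·)) :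
    mergeKpis la lp = (lp.filter (fun x => !la.contains x),
                       la.filter (fun x => !lp.contains x),
                       la.filter (fun x => lp.contains x)) := by
  induction la, lp using mergeKpis.induct with
  | case1 lp => simp [mergeKpis]
  | case2 a la => simp [mergeKpis]
  | case3 a la b lp heq ih =>
    have hab : a = b := by simpa using heq
    subst hab
    have ha' := ha.of_cons
    have hp' := hp.of_cons
    have hga : ∀ x ∈ la, a < x := fun x hx => List.rel_of_pairwise_cons ha hx
    have hgp : ∀ x ∈ lp, a < x := fun x hx => List.rel_of_pairwise_cons hp hx
    rw [mergeKpis, if_pos heq, ih ha' hp']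
    dsimp only
    refine congrArg₂ Prod.mk ?_ (congrArg₂ Prod.mk ?_ ?_)
    · rw [List.filter_cons_of_neg (by simp), List.filter_congr]
      intro x hx
      have := (hgp x hx).ne'
      simp [this]
    · rw [List.filter_cons_of_neg (by simp), List.filter_congr]
      intro x hx
      have := (hga x hx).ne'
      simp [this]
    · rw [List.filter_cons_of_pos (by simp), List.filter_congr]
      intro x hx
      have := (hga x hx).ne'
      simp [this]
  | case4 a la b lp hne hlt ih =>
    have hab : a < b := of_decide_eq_true (by simpa using hlt)
    have ha' := ha.of_cons
    have hga : ∀ x ∈ la, a < x := fun x hx => List.rel_of_pairwise_cons ha hx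
    have hgp : ∀ x ∈ b :: lp, a < x := by
      intro x hx
      rcases List.mem_cons.mp hx with h | h
      · exact h ▸ hab
      · exact lt_trans hab (List.rel_of_pairwise_cons hp h)
    have hna : a ∉ b :: lp := fun h => lt_irrefl a (hgp a h)
    rw [mergeKpis, if_neg (by simpa using hne), if_pos hlt, ih ha' hp]
    dsimp only
    refine congrArg₂ Prod.mk ?_ (congrArg₂ Prod.mk ?_ ?_)
    · rw [List.filter_congr]
      intro x hx
      have := (hgp x hx).ne'
      simp [this]
    · rw [List.filter_cons_of_pos (by simp [hna])]
    · rw [List.filter_cons_of_neg (by simp [hna])]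
  | case5 a la b lp hne hnlt ih =>
    have hne' : a ≠ b := by simpa using hne
    have hnlt' : ¬ a < b := of_decide_eq_false (by simpa using hnlt)
    have hba : b < a := lt_of_le_of_ne (le_of_not_gt hnlt') hne'.symm
    have hp' := hp.of_cons
    have hgp : ∀ x ∈ lp, b < x := fun x hx => List.rel_of_pairwise_cons hp hx
    have hga : ∀ x ∈ a :: la, b < x := by
      intro x hx
      rcases List.mem_cons.mp hx with h | h
      · exact h ▸ hba
      · exact lt_trans hba (List.rel_of_pairwise_cons ha h)
    have hnb : b ∉ a :: la := fun h => lt_irrefl b (hga b h)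
    rw [mergeKpis, if_neg hne, if_neg hnlt, ih ha hp']
    dsimp only
    refine congrArg₂ Prod.mk ?_ (congrArg₂ Prod.mk ?_ ?_)
    · rw [List.filter_cons_of_pos (by simp [hnb])]
    · rw [List.filter_congr]
      intro x hx
      have := (hga x hx).ne'
      simp [this]
    · rw [List.filter_congr]
      intro x hx
      have := (hga x hx).ne'
      simp [this]

-- ===== VERDICT (by name: the statement is the Claim_ definition above) =====
theorem compare_kpi_coverage_spec : Claim_equal_compare_kpi_coverage := by
  intro lf pf _ _
  show _ = _
  unfold compare_kpi_coverage compare_kpi_coverage_alt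
  dsimp only
  set lc := (PySem.Dict.mk ((PySem.Dict.mk lf).getD "kpi_counts" [])).items with hlc
  set pc := (PySem.Dict.mk ((PySem.Dict.mk pf).getD "kpi_counts" [])).items with hpc
  set s : PySem.Set String := PySem.Set.ofList ((lc.filter (fun p => decide (p.2 > 0))).map (·.1)) with hs
  set t : PySem.Set String := PySem.Set.ofList ((pc.filter (fun p => decide (p.2 > 0))).map (·.1)) with ht
  have hsnd : s.Nodup := hs ▸ PySem.Set.nodup_ofList _
  have htnd : t.Nodup := ht ▸ PySem.Set.nodup_ofList _
  rw [pv_merge_eq (PySem.List.sorted s (fun x => x) false) (PySem.List.sorted t (fun x => x) false)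
        (pv_sorted_pairwise_lt s hsnd) (pv_sorted_pairwise_lt t htnd)]
  refine congrArg₂ _ ?_ (congrArg₂ _ ?_ (congrArg₂ _ ?_ rfl))
  · -- dropped  = prev - latest
    refine congrArg _ (pv_filter_sorted t _ htnd (PySem.Set.nodup_diff t s htnd) _ ?_).symm
    intro x
    simp [PySem.Set.mem_diff, PySem.List.mem_sorted]
  · -- added = latest - prev
    refine congrArg _ (pv_filter_sorted s _ hsnd (PySem.Set.nodup_diff s t hsnd) _ ?_).symm
    intro x
    simp [PySem.Set.mem_diff, PySem.List.mem_sorted]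
  · -- retained = latest & prev
    refine congrArg _ (pv_filter_sorted s _ hsnd (PySem.Set.nodup_inter s t hsnd) _ ?_).symm
    intro x
    simp [PySem.Set.mem_inter, PySem.List.mem_sorted]
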